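-- pv_equiv track=rewrite | github.com/PhTelli/Tecnologias_e_Tecnologias_Integradas | lista2/Exercicio5.py | k_maiores_elementos
-- ===== SOURCE A (Python) =====
-- def k_maiores_elementos(lista, k):
--     lista_copia = lista[:]
--     lista_copia.sort(reverse=True)
--     maiores_elementos = lista_copia[:k]
--     k_maiores_na_ordem_original = []
--
--     for elemento in lista:
--         if elemento in maiores_elementos:
--             k_maiores_na_ordem_original.append(elemento)
--     return k_maiores_na_ordem_original
-- ===== SOURCE B (Python) =====
-- def k_maiores_elementos(lista, k):
--     sel = sorted(lista, reverse=True)[:k]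
--     if not sel:
--         return []
--     limite = sel[-1]
--     return [x for x in lista if x >= limite]
-- ===== Notes on version B (the rewrite author's own statement) =====
-- stated objective: faster
-- what changed: B replaces A's per-element membership scan of the top-k list by a single numeric threshold comparison x >= (k-th largest value), keeping only a scalar after the sort.
import Mathlib
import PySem

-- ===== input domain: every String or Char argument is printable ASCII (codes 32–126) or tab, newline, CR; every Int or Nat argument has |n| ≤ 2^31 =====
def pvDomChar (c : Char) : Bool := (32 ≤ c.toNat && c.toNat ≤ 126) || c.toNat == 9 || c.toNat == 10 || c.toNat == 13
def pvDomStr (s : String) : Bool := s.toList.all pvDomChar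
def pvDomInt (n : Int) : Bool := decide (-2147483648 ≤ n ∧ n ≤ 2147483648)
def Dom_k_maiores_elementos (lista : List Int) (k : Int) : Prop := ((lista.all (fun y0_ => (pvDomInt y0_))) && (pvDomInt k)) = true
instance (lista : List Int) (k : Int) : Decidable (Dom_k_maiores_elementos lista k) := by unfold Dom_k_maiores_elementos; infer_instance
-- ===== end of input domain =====

-- B replaces A's per-element membership test against the top-k list by a single
-- threshold comparison with the k-th largest value (objective: simpler).


-- ===== PORT A =====
def k_maiores_elementos (lista : List Int) (k : Int) : List Int :=
  let lista_copia := PySem.List.sorted lista (fun x => x) true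
  let maiores_elementos := PySem.List.slice lista_copia none (some k)
  lista.foldl (fun acc elemento =>
    if elemento ∈ maiores_elementos then acc ++ [elemento] else acc) []

-- ===== PORT B =====
def k_maiores_elementos_alt (lista : List Int) (k : Int) : List Int :=
  let sel := PySem.List.slice (PySem.List.sorted lista (fun x => x) true) none (some k)
  match sel.getLast? with
  | none => []
  | some limite => lista.filter (fun x => limite ≤ x)

-- ===== PRECONDITION & SPEC =====
def Spec_k_maiores_elementos (lista : List Int) (k : Int) (out : List Int) : Prop := out = k_maiores_elementos_alt lista k
instance (lista : List Int) (k : Int) (out : List Int) : Decidable (Spec_k_maiores_elementos lista k out) := by unfold Spec_k_maiores_elementos; infer_instance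

-- ===== CLAIM (what is proved, stated in full; the proofs are below) =====
def Claim_equal_k_maiores_elementos : Prop := ∀ (lista : List Int) (k : Int), Dom_k_maiores_elementos lista k → Spec_k_maiores_elementos lista k (k_maiores_elementos lista k)

-- ===== LEMMAS AND PROOFS =====

-- xs[:k] is a prefix of xs for every Int k.
lemma slice_to_is_take (xs : List Int) (k : Int) :
    ∃ m : Nat, PySem.List.slice xs none (some k) = xs.take m := by
  by_cases hk : 0 ≤ k
  · exact ⟨k.toNat, PySem.List.slice_to xs hk⟩
  · obtain ⟨j, hj⟩ : ∃ j : Nat, k = -(j : Int) := ⟨k.natAbs, by omega⟩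
    refine ⟨xs.length - j, ?_⟩
    rw [hj, PySem.List.slice_to_neg_natCast xs j (by omega)]

-- In a descending-sorted list, membership in a nonempty prefix is exactly
-- "at least the prefix's last element", for elements of the list.
lemma mem_take_iff_last_le (ord : List Int)
    (hp : List.Pairwise (fun a b => b ≤ a) ord) (m : Nat)
    (hne : ord.take m ≠ []) (x : Int) (hx : x ∈ ord) :
    x ∈ ord.take m ↔ (ord.take m).getLast hne ≤ x := by
  have hlt : (ord.take m).length ≤ ord.length := by simp
  have htpos : 0 < (ord.take m).length := List.length_pos_iff.mpr hne
  have hget : ∀ i (h : i < (ord.take m).length),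
      (ord.take m)[i] = ord[i]'(lt_of_lt_of_le h hlt) := by
    intro i h; simp
  have hlast : (ord.take m).getLast hne = ord[(ord.take m).length - 1]'(by omega) := by
    rw [List.getLast_eq_getElem]; exact hget _ (by omega)
  have hpair := List.pairwise_iff_getElem.mp hp
  have hmono : ∀ p q (hp' : p < ord.length) (hq' : q < ord.length),
      p ≤ q → ord[q] ≤ ord[p] := by
    intro p q hp' hq' hpq
    rcases Nat.eq_or_lt_of_le hpq with rfl | h
    · exact le_refl _
    · exact hpair _ _ _ hq' h
  constructor
  · intro hxm
    obtain ⟨i, hi, hxe⟩ := List.mem_iff_getElem.mp hxm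
    rw [hlast, ← hxe, hget i hi]
    exact hmono i ((ord.take m).length - 1) (by omega) (by omega) (by omega)
  · intro hle
    obtain ⟨j, hj, hxe⟩ := List.mem_iff_getElem.mp hx
    by_cases hjm : j < (ord.take m).length
    · rw [← hxe, ← hget j hjm]; exact List.getElem_mem hjm
    · have h1 : ord[j] ≤ ord[(ord.take m).length - 1]'(by omega) :=
        hmono ((ord.take m).length - 1) j (by omega) hj (by omega)
      have hxeq : x = (ord.take m).getLast hne := by
        rw [hlast]; rw [hlast] at hle; omega
      rw [hxeq]; exact List.getLast_mem hne

-- ===== VERDICT (by name: the statement is the Claim_ definition above) =====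
theorem k_maiores_elementos_spec : Claim_equal_k_maiores_elementos := by
  intro lista k _
  unfold Spec_k_maiores_elementos k_maiores_elementos k_maiores_elementos_alt
  simp only []
  rw [PySem.List.foldl_append_ite_eq_filter]
  rcases hl : (PySem.List.slice (PySem.List.sorted lista (fun x => x) true) none (some k)).getLast?
    with _ | limite
  · have : PySem.List.slice (PySem.List.sorted lista (fun x => x) true) none (some k) = [] :=
      List.getLast?_eq_none_iff.mp hl
    simp [this]
  · have hne : PySem.List.slice (PySem.List.sorted lista (fun x => x) true) none (some k) ≠ [] := by
      intro h; rw [h] at hl; simp at hl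
    obtain ⟨m, hm⟩ := slice_to_is_take (PySem.List.sorted lista (fun x => x) true) k
    have hp : List.Pairwise (fun a b => b ≤ a) (PySem.List.sorted lista (fun x => x) true) :=
      PySem.List.sorted_pairwise_rev lista (fun x => x)
    have hne' : (PySem.List.sorted lista (fun x => x) true).take m ≠ [] := by rwa [← hm]
    have hlim : ((PySem.List.sorted lista (fun x => x) true).take m).getLast hne' = limite := by
      have h2 : ((PySem.List.sorted lista (fun x => x) true).take m).getLast? = some limite := by
        rw [← hm]; exact hl
      rw [List.getLast?_eq_some_getLast hne'] at h2
      exact Option.some.inj h2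
    simp only [List.nil_append]
    apply List.filter_congr
    intro x hxl
    have hx : x ∈ PySem.List.sorted lista (fun x => x) true :=
      (PySem.List.mem_sorted lista (fun x => x) true x).mpr hxl
    have hiff := mem_take_iff_last_le _ hp m hne' x hx
    rw [hlim] at hiff
    rw [hm]
    simp [hiff]
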